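-- pv_equiv track=rewrite | github.com/jjcastle1992/CS7320_A4_RoboVac | RoboVac0.py | coordinate_finder
-- ===== SOURCE A (Python) =====
-- def coordinate_finder(target_val, current_board, goal_board):
--     """
--     Finds coordinates of a target value (int) in 2 boards:
--         1. Current Board
--         2. Goal Board
--     :param target_val: int to search for in the current and goal boards
--     :param current_board: 2d list of ints containing the current board
--     :param goal_board: 2d list of ints containing the goal board
--     :return: tuple containing 2 ints
--     """
--     current_board_coords = (-1, -1)
--     goal_board_coords = (-1, -1)
--
--     # find current board coordinates for the target value
--     for row_idx, row in enumerate(current_board):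
--         for col_idx, element in enumerate(row):
--             if element == target_val:
--                 current_board_coords = (row_idx, col_idx)
--
--     # find goal board coordinates for the target value
--     for row_idx, row in enumerate(goal_board):
--         for col_idx, element in enumerate(row):
--             if element == target_val:
--                 goal_board_coords = (row_idx, col_idx)
--
--     return current_board_coords, goal_board_coords
-- ===== SOURCE B (Python) =====
-- def _last_coords(target_val, board):
--     # backward scan with early exit: first match from the end == last forward match
--     for row_idx in range(len(board) - 1, -1, -1):
--         row = board[row_idx]
--         for col_idx in range(len(row) - 1, -1, -1):
--             if row[col_idx] == target_val:
--                 return (row_idx, col_idx)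
--     return (-1, -1)
--
--
-- def coordinate_finder(target_val, current_board, goal_board):
--     return _last_coords(target_val, current_board), _last_coords(target_val, goal_board)
-- ===== Notes on version B (the rewrite author's own statement) =====
-- stated objective: alternative
-- what changed: Replaces the full forward scan that overwrites the result on every match with a backward scan (rows and columns from the end) that returns at the first match found.
import Mathlib
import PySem

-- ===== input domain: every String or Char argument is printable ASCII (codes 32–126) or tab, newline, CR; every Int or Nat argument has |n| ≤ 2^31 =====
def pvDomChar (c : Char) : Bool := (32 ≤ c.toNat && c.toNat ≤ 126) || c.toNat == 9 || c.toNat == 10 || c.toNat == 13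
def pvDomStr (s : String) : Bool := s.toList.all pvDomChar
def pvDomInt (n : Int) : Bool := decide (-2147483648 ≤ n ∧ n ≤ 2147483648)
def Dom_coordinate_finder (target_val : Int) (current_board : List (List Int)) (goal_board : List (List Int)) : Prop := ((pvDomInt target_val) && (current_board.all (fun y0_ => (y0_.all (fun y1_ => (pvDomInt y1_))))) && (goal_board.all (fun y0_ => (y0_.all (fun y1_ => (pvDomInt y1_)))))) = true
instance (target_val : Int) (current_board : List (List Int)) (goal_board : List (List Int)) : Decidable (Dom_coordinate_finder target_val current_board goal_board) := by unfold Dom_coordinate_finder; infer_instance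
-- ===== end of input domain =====

-- B replaces A's overwrite-on-every-match full forward scan by a backward scan with early
-- exit at the first (= last forward) match; objective: alternative algorithm, same cost.

-- ===== PORT A =====
-- forward scan over both boards, recording (row, col) at EVERY match (last one wins)
def coordinate_finder (target_val : Int) (current_board : List (List Int)) (goal_board : List (List Int)) : (Int × Int) × (Int × Int) :=
  let current_board_coords : Int × Int :=
    (PySem.List.enumerate current_board).foldl (fun acc p =>
      (PySem.List.enumerate p.2).foldl (fun a q =>
        if q.2 = target_val then (p.1, q.1) else a) acc) (-1, -1)
  let goal_board_coords : Int × Int :=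
    (PySem.List.enumerate goal_board).foldl (fun acc p =>
      (PySem.List.enumerate p.2).foldl (fun a q =>
        if q.2 = target_val then (p.1, q.1) else a) acc) (-1, -1)
  (current_board_coords, goal_board_coords)

-- ===== PORT B =====
-- backward column scan: `for col_idx in range(len(row)-1, -1, -1): if row[col_idx] == t: return col_idx`
def pvScanCols (t : Int) (row : List Int) : Nat → Option Nat
  | 0 => none
  | j + 1 => if row.getD j 0 = t then some j else pvScanCols t row j

-- backward row scan: rows from the end; first row with a match wins
def pvScanRows (t : Int) (board : List (List Int)) : Nat → Option (Nat × Nat)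
  | 0 => none
  | i + 1 =>
    match pvScanCols t (board.getD i []) (board.getD i []).length with
    | some j => some (i, j)
    | none => pvScanRows t board i

def pvLastCoords (t : Int) (board : List (List Int)) : Int × Int :=
  match pvScanRows t board board.length with
  | some (i, j) => ((i : Int), (j : Int))
  | none => (-1, -1)

def coordinate_finder_alt (target_val : Int) (current_board : List (List Int)) (goal_board : List (List Int)) : (Int × Int) × (Int × Int) :=
  (pvLastCoords target_val current_board, pvLastCoords target_val goal_board)

-- ===== PRECONDITION & SPEC =====
def Spec_coordinate_finder (target_val : Int) (current_board : List (List Int)) (goal_board : List (List Int)) (out : (Int × Int) × (Int × Int)) : Prop := out = coordinate_finder_alt target_val current_board goal_board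
instance (target_val : Int) (current_board : List (List Int)) (goal_board : List (List Int)) (out : (Int × Int) × (Int × Int)) : Decidable (Spec_coordinate_finder target_val current_board goal_board out) := by unfold Spec_coordinate_finder; infer_instance

-- ===== CLAIM (what is proved, stated in full; the proofs are below) =====
def Claim_equal_coordinate_finder : Prop := ∀ (target_val : Int) (current_board : List (List Int)) (goal_board : List (List Int)), Dom_coordinate_finder target_val current_board goal_board → Spec_coordinate_finder target_val current_board goal_board (coordinate_finder target_val current_board goal_board)

-- ===== LEMMAS AND PROOFS =====

lemma pvScanCols_append (t : Int) (x : Int) (xs : List Int) :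
    ∀ j, j ≤ xs.length → pvScanCols t (xs ++ [x]) j = pvScanCols t xs j := by
  intro j
  induction j with
  | zero => intro _; rfl
  | succ j ih =>
    intro hj
    have hlt : j < xs.length := hj
    simp only [pvScanCols, List.getD, List.getElem?_append_left hlt, ih (Nat.le_of_lt hlt)]
    rfl

lemma pvScanRows_append (t : Int) (r : List Int) (bs : List (List Int)) :
    ∀ i, i ≤ bs.length → pvScanRows t (bs ++ [r]) i = pvScanRows t bs i := by
  intro i
  induction i with
  | zero => intro _; rfl
  | succ i ih =>
    intro hi
    have hlt : i < bs.length := hi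
    simp only [pvScanRows, List.getD, List.getElem?_append_left hlt, ih (Nat.le_of_lt hlt)]

lemma row_fold_eq (t : Int) (i : Int) (row : List Int) :
    ∀ acc : Int × Int,
      (PySem.List.enumerate row).foldl (fun a q => if q.2 = t then (i, q.1) else a) acc
        = (match pvScanCols t row row.length with
            | some j => (i, (j : Int))
            | none => acc) := by
  induction row using List.reverseRecOn with
  | nil => intro acc; rfl
  | append_singleton xs x ih =>
    intro acc
    rw [PySem.List.enumerate_append, List.foldl_append]
    simp only [PySem.List.enumerate, List.foldl_cons, List.foldl_nil]
    rw [ih]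
    have hlen : (xs ++ [x]).length = xs.length + 1 := by simp
    rw [hlen]
    have hget : (xs ++ [x]).getD xs.length 0 = x := by
      simp [List.getD]
    by_cases hx : x = t
    · simp [pvScanCols, hx]
    · simp only [pvScanCols, hget, if_neg hx,
        pvScanCols_append t x xs xs.length (le_refl _)]

lemma board_fold_eq (t : Int) (board : List (List Int)) :
    ∀ acc : Int × Int,
      (PySem.List.enumerate board).foldl (fun acc p =>
          (PySem.List.enumerate p.2).foldl (fun a q =>
            if q.2 = t then (p.1, q.1) else a) acc) acc
        = (match pvScanRows t board board.length with
            | some (i, j) => ((i : Int), (j : Int))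
            | none => acc) := by
  induction board using List.reverseRecOn with
  | nil => intro acc; rfl
  | append_singleton bs r ih =>
    intro acc
    rw [PySem.List.enumerate_append, List.foldl_append]
    simp only [PySem.List.enumerate, List.foldl_cons, List.foldl_nil]
    rw [ih, row_fold_eq]
    have hlen : (bs ++ [r]).length = bs.length + 1 := by simp
    rw [hlen]
    have hget : (bs ++ [r]).getD bs.length [] = r := by
      simp [List.getD]
    simp only [pvScanRows, hget,
      pvScanRows_append t r bs bs.length (le_refl _)]
    cases pvScanCols t r r.length with
    | some j => simp
    | none => rfl

lemma lastCoords_eq (t : Int) (board : List (List Int)) :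
    (PySem.List.enumerate board).foldl (fun acc p =>
        (PySem.List.enumerate p.2).foldl (fun a q =>
          if q.2 = t then (p.1, q.1) else a) acc) (-1, -1)
      = pvLastCoords t board := by
  rw [board_fold_eq, pvLastCoords]

-- ===== VERDICT (by name: the statement is the Claim_ definition above) =====
theorem coordinate_finder_spec : Claim_equal_coordinate_finder := by
  intro t cb gb _
  unfold Spec_coordinate_finder coordinate_finder coordinate_finder_alt
  rw [lastCoords_eq, lastCoords_eq]
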